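-- pv_equiv track=rewrite | github.com/roshinpv1/appgates | backup/meta.py | group_languages
-- ===== SOURCE A (Python) =====
-- from collections import defaultdict, Counter
--
-- def group_languages(lang_counter):
--     groups = {
--         "Programming Languages": ["Java", "Python", "C#", "JavaScript", "TypeScript", "PHP", "cmd", "bat"],
--         "Markup/Templating": ["HTML", "XML"],
--         "Stylesheets": ["css", "scss"],
--         "Configuration": ["YAML", "Java Properties", "JSON", "ENV", "jmx", "sql"],
--         "Build Scripts": ["gradle"]
--     }
--
--     grouped = defaultdict(dict)
--
--     for lang, count in lang_counter.items():
--         if lang.lower() in ["", "md", "txt", "png", "svg", "woff", "ttf", "eot", "jar"]: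
--             continue  # Ignore binary/assets/misc
--
--         matched = False
--         for category, keywords in groups.items():
--             if lang.lower() in [k.lower() for k in keywords]:
--                 grouped[category][lang] = count
--                 matched = True
--                 break
--         if not matched:
--             grouped["Uncategorized"][lang] = count
--
--     return dict(grouped)
-- ===== SOURCE B (Python) =====
-- CATEGORY_OF = {
--     "java": "Programming Languages", "python": "Programming Languages",
--     "c#": "Programming Languages", "javascript": "Programming Languages",
--     "typescript": "Programming Languages", "php": "Programming Languages",
--     "cmd": "Programming Languages", "bat": "Programming Languages",
--     "html": "Markup/Templating", "xml": "Markup/Templating",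
--     "css": "Stylesheets", "scss": "Stylesheets",
--     "yaml": "Configuration", "java properties": "Configuration",
--     "json": "Configuration", "env": "Configuration", "jmx": "Configuration",
--     "sql": "Configuration",
--     "gradle": "Build Scripts",
-- }
-- SKIP = {"", "md", "txt", "png", "svg", "woff", "ttf", "eot", "jar"}
--
-- def group_languages(lang_counter):
--     # Stage 1: tag every surviving language with its category.
--     tagged = [(CATEGORY_OF.get(lang.lower(), "Uncategorized"), lang, count)
--               for lang, count in lang_counter.items()
--               if lang.lower() not in SKIP]
--     # Stage 2: categories in order of first appearance.
--     order = dict.fromkeys(c for c, _, _ in tagged)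
--     # Stage 3: one sub-dict per category.
--     return {c: {lang: count for cc, lang, count in tagged if cc == c} for c in order}
-- ===== Notes on version B (the rewrite author's own statement) =====
-- stated objective: faster
-- what changed: B is a staged pipeline instead of A's single loop with a nested category/keyword scan: it tags each non-skipped language with its category via a precomputed module-level keyword->category table, derives the category order with dict.fromkeys, and builds each category's sub-dict by a per-category comprehension over the tagged list.
import Mathlib
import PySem

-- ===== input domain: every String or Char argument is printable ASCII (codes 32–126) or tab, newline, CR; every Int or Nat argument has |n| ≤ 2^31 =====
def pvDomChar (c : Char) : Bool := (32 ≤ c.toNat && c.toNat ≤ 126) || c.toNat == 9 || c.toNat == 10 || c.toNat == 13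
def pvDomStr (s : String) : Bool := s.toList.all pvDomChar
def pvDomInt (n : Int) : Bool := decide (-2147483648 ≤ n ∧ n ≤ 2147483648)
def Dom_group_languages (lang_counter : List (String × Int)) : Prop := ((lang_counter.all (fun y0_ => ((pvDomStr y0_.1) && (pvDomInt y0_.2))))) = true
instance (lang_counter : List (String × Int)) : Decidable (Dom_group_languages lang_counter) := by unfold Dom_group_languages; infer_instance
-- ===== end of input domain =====

-- B replaces A's single loop with a nested category/keyword scan by a staged pipeline:
-- tag each surviving language with its category via a precomputed keyword→category table,
-- take the category order with dict.fromkeys, then build each category's sub-dict by a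
-- per-category pass over the tagged list (objective: faster in a timing run; same return value).

-- ===== PORT A =====
def pvGroupsA : List (String × List String) :=
  [("Programming Languages", ["Java", "Python", "C#", "JavaScript", "TypeScript", "PHP", "cmd", "bat"]),
   ("Markup/Templating", ["HTML", "XML"]),
   ("Stylesheets", ["css", "scss"]),
   ("Configuration", ["YAML", "Java Properties", "JSON", "ENV", "jmx", "sql"]),
   ("Build Scripts", ["gradle"])]

def pvIgnoreA : List String := ["", "md", "txt", "png", "svg", "woff", "ttf", "eot", "jar"]

-- A's `grouped[category][lang] = count` on a defaultdict(dict): overwrite in place, new keys append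
def pvDictSet (d : List (String × Int)) (k : String) (v : Int) : List (String × Int) :=
  match d with
  | [] => [(k, v)]
  | (k', v') :: rest => if k' == k then (k, v) :: rest else (k', v') :: pvDictSet rest k v

def pvGroupedSet (g : List (String × List (String × Int))) (cat lang : String) (count : Int) :
    List (String × List (String × Int)) :=
  match g with
  | [] => [(cat, [(lang, count)])]
  | (c, d) :: rest =>
      if c == cat then (c, pvDictSet d lang count) :: rest
      else (c, d) :: pvGroupedSet rest cat lang count

-- A's inner `for category, keywords in groups.items(): … break` loop
def pvFindCatA : List (String × List String) → String → Option String
  | [], _ => none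
  | (cat, kws) :: rest, l =>
      if (kws.map PySem.Str.lower).contains l then some cat else pvFindCatA rest l

def group_languages (lang_counter : List (String × Int)) : List (String × List (String × Int)) :=
  lang_counter.foldl (fun grouped p =>
    if pvIgnoreA.contains (PySem.Str.lower p.1) then grouped
    else
      match pvFindCatA pvGroupsA (PySem.Str.lower p.1) with
      | some cat => pvGroupedSet grouped cat p.1 p.2
      | none => pvGroupedSet grouped "Uncategorized" p.1 p.2) []

-- ===== PORT B =====
-- B's module-level flat lookup table CATEGORY_OF (lowered keyword -> category)
def pvCatOfB : PySem.Dict String String := PySem.Dict.mk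
  [("java", "Programming Languages"), ("python", "Programming Languages"),
   ("c#", "Programming Languages"), ("javascript", "Programming Languages"),
   ("typescript", "Programming Languages"), ("php", "Programming Languages"),
   ("cmd", "Programming Languages"), ("bat", "Programming Languages"),
   ("html", "Markup/Templating"), ("xml", "Markup/Templating"),
   ("css", "Stylesheets"), ("scss", "Stylesheets"),
   ("yaml", "Configuration"), ("java properties", "Configuration"),
   ("json", "Configuration"), ("env", "Configuration"), ("jmx", "Configuration"),
   ("sql", "Configuration"), ("gradle", "Build Scripts")]

def pvSkipB : PySem.Set String :=
  PySem.Set.ofList ["", "md", "txt", "png", "svg", "woff", "ttf", "eot", "jar"]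

-- stage 1: `[(CATEGORY_OF.get(l.lower(), "Uncategorized"), l, n) for l, n in … if l.lower() not in SKIP]`
def pvTagged (lang_counter : List (String × Int)) : List (String × String × Int) :=
  (lang_counter.filter (fun p => !(PySem.Set.contains pvSkipB (PySem.Str.lower p.1)))).map
    (fun p => (PySem.Dict.getD pvCatOfB (PySem.Str.lower p.1) "Uncategorized", p.1, p.2))

def group_languages_alt (lang_counter : List (String × Int)) : List (String × List (String × Int)) :=
  let ts := pvTagged lang_counter
  -- stage 2: `dict.fromkeys` of the categories; stage 3: per-category dict comprehension
  (PySem.List.dedup (ts.map (fun t => t.1))).map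
    (fun c => (c, ((ts.filter (fun t => t.1 == c)).foldl
        (fun d t => PySem.Dict.insert d t.2.1 t.2.2) PySem.Dict.empty).items))

-- ===== PRECONDITION & SPEC =====
def Spec_group_languages (lang_counter : List (String × Int)) (out : List (String × List (String × Int))) : Prop := out = group_languages_alt lang_counter
instance (lang_counter : List (String × Int)) (out : List (String × List (String × Int))) : Decidable (Spec_group_languages lang_counter out) := by unfold Spec_group_languages; infer_instance

-- ===== CLAIM (what is proved, stated in full; the proofs are below) =====
def Claim_equal_group_languages : Prop := ∀ (lang_counter : List (String × Int)), Dom_group_languages lang_counter → Spec_group_languages lang_counter (group_languages lang_counter)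

-- ===== LEMMAS AND PROOFS =====

lemma pvSkipB_eq : pvSkipB = pvIgnoreA := by decide

lemma resolve_eq (l : String) :
    (match pvFindCatA pvGroupsA l with
     | some cat => cat
     | none => "Uncategorized") = PySem.Dict.getD pvCatOfB l "Uncategorized" := by
  by_cases h1 : l = "java"
  · subst h1; decide
  by_cases h2 : l = "python"
  · subst h2; decide
  by_cases h3 : l = "c#"
  · subst h3; decide
  by_cases h4 : l = "javascript"
  · subst h4; decide
  by_cases h5 : l = "typescript"
  · subst h5; decide
  by_cases h6 : l = "php"
  · subst h6; decide
  by_cases h7 : l = "cmd"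
  · subst h7; decide
  by_cases h8 : l = "bat"
  · subst h8; decide
  by_cases h9 : l = "html"
  · subst h9; decide
  by_cases h10 : l = "xml"
  · subst h10; decide
  by_cases h11 : l = "css"
  · subst h11; decide
  by_cases h12 : l = "scss"
  · subst h12; decide
  by_cases h13 : l = "yaml"
  · subst h13; decide
  by_cases h14 : l = "java properties"
  · subst h14; decide
  by_cases h15 : l = "json"
  · subst h15; decide
  by_cases h16 : l = "env"
  · subst h16; decide
  by_cases h17 : l = "jmx"
  · subst h17; decide
  by_cases h18 : l = "sql"
  · subst h18; decide
  by_cases h19 : l = "gradle"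
  · subst h19; decide
  have m1 : (["Java", "Python", "C#", "JavaScript", "TypeScript", "PHP", "cmd", "bat"].map PySem.Str.lower) = ["java", "python", "c#", "javascript", "typescript", "php", "cmd", "bat"] := by decide
  have m2 : (["HTML", "XML"].map PySem.Str.lower) = ["html", "xml"] := by decide
  have m3 : (["css", "scss"].map PySem.Str.lower) = ["css", "scss"] := by decide
  have m4 : (["YAML", "Java Properties", "JSON", "ENV", "jmx", "sql"].map PySem.Str.lower) = ["yaml", "java properties", "json", "env", "jmx", "sql"] := by decide
  have m5 : (["gradle"].map PySem.Str.lower) = ["gradle"] := by decide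
  have hnone : pvFindCatA pvGroupsA l = none := by
    simp only [pvGroupsA, pvFindCatA, m1, m2, m3, m4, m5]
    simp [List.contains_eq_mem, h1, h2, h3, h4, h5, h6, h7, h8, h9, h10, h11, h12, h13, h14, h15, h16, h17, h18, h19]
  rw [hnone]
  have b1 : ("java" == l) = false := beq_eq_false_iff_ne.mpr (Ne.symm h1)
  have b2 : ("python" == l) = false := beq_eq_false_iff_ne.mpr (Ne.symm h2)
  have b3 : ("c#" == l) = false := beq_eq_false_iff_ne.mpr (Ne.symm h3)
  have b4 : ("javascript" == l) = false := beq_eq_false_iff_ne.mpr (Ne.symm h4)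
  have b5 : ("typescript" == l) = false := beq_eq_false_iff_ne.mpr (Ne.symm h5)
  have b6 : ("php" == l) = false := beq_eq_false_iff_ne.mpr (Ne.symm h6)
  have b7 : ("cmd" == l) = false := beq_eq_false_iff_ne.mpr (Ne.symm h7)
  have b8 : ("bat" == l) = false := beq_eq_false_iff_ne.mpr (Ne.symm h8)
  have b9 : ("html" == l) = false := beq_eq_false_iff_ne.mpr (Ne.symm h9)
  have b10 : ("xml" == l) = false := beq_eq_false_iff_ne.mpr (Ne.symm h10)
  have b11 : ("css" == l) = false := beq_eq_false_iff_ne.mpr (Ne.symm h11)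
  have b12 : ("scss" == l) = false := beq_eq_false_iff_ne.mpr (Ne.symm h12)
  have b13 : ("yaml" == l) = false := beq_eq_false_iff_ne.mpr (Ne.symm h13)
  have b14 : ("java properties" == l) = false := beq_eq_false_iff_ne.mpr (Ne.symm h14)
  have b15 : ("json" == l) = false := beq_eq_false_iff_ne.mpr (Ne.symm h15)
  have b16 : ("env" == l) = false := beq_eq_false_iff_ne.mpr (Ne.symm h16)
  have b17 : ("jmx" == l) = false := beq_eq_false_iff_ne.mpr (Ne.symm h17)
  have b18 : ("sql" == l) = false := beq_eq_false_iff_ne.mpr (Ne.symm h18)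
  have b19 : ("gradle" == l) = false := beq_eq_false_iff_ne.mpr (Ne.symm h19)
  simp [pvCatOfB, PySem.Dict.getD, PySem.Dict.get?, List.find?, b1, b2, b3, b4, b5, b6, b7, b8, b9, b10, b11, b12, b13, b14, b15, b16, b17, b18, b19]

-- A's loop is the pvGroupedSet fold over the tagged list
lemma afold_tagged (xs : List (String × Int)) (g : List (String × List (String × Int))) :
    xs.foldl (fun grouped p =>
      if pvIgnoreA.contains (PySem.Str.lower p.1) then grouped
      else
        match pvFindCatA pvGroupsA (PySem.Str.lower p.1) with
        | some cat => pvGroupedSet grouped cat p.1 p.2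
        | none => pvGroupedSet grouped "Uncategorized" p.1 p.2) g =
    (pvTagged xs).foldl (fun g t => pvGroupedSet g t.1 t.2.1 t.2.2) g := by
  induction xs generalizing g with
  | nil => rfl
  | cons p rest ih =>
      rw [List.foldl_cons]
      by_cases h : pvIgnoreA.contains (PySem.Str.lower p.1) = true
      · rw [if_pos h, ih]
        have hm : PySem.Str.lower p.1 ∈ pvIgnoreA := by
          simpa [List.contains_eq_mem] using h
        have ht : pvTagged (p :: rest) = pvTagged rest := by
          simp [pvTagged, pvSkipB_eq, PySem.Set.contains_eq_listContains, hm]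
        rw [ht]
      · rw [if_neg h]
        have hres : (match pvFindCatA pvGroupsA (PySem.Str.lower p.1) with
              | some cat => pvGroupedSet g cat p.1 p.2
              | none => pvGroupedSet g "Uncategorized" p.1 p.2) =
            pvGroupedSet g (PySem.Dict.getD pvCatOfB (PySem.Str.lower p.1) "Uncategorized") p.1 p.2 := by
          rw [← resolve_eq]; cases pvFindCatA pvGroupsA (PySem.Str.lower p.1) <;> rfl
        rw [hres, ih]
        have ht : pvTagged (p :: rest) =
            (PySem.Dict.getD pvCatOfB (PySem.Str.lower p.1) "Uncategorized", p.1, p.2) :: pvTagged rest := by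
          have hm : PySem.Str.lower p.1 ∉ pvIgnoreA := by
            simpa [List.contains_eq_mem] using h
          simp [pvTagged, pvSkipB_eq, PySem.Set.contains_eq_listContains, hm]
        rw [ht, List.foldl_cons]

lemma groupedSet_not_mem (g : List (String × List (String × Int))) (c l : String) (n : Int)
    (h : c ∉ g.map Prod.fst) : pvGroupedSet g c l n = g ++ [(c, [(l, n)])] := by
  induction g with
  | nil => rfl
  | cons p rest ih =>
      obtain ⟨c', d⟩ := p
      simp only [List.map_cons, List.mem_cons, not_or] at h
      simp only [pvGroupedSet]
      rw [if_neg (fun hb => h.1 (beq_iff_eq.mp hb).symm), List.cons_append, ih h.2]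

lemma groupedSet_map (o : List String) (f : String → List (String × Int)) (c l : String) (n : Int)
    (ho : o.Nodup) (hc : c ∈ o) :
    pvGroupedSet (o.map (fun c' => (c', f c'))) c l n =
    o.map (fun c' => (c', if c' = c then pvDictSet (f c') l n else f c')) := by
  induction o with
  | nil => simp at hc
  | cons a rest ih =>
      simp only [List.nodup_cons] at ho
      by_cases ha : a = c
      · subst ha
        have hbeq : (a == a) = true := by simp
        simp only [List.map_cons, pvGroupedSet]
        rw [if_pos hbeq]
        simp
        intro x hx he
        exact absurd (he ▸ hx) ho.1
      · have hc' : c ∈ rest := by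
          rcases List.mem_cons.mp hc with h | h
          · exact absurd h.symm ha
          · exact h
        simp only [List.map_cons, pvGroupedSet]
        rw [if_neg (by simp [ha]), if_neg ha, ih ho.2 hc']

-- B's dict comprehension (PySem.Dict.insert fold) produces A's assoc-list assignment
lemma pvDictSet_not_mem (d : List (String × Int)) (k : String) (v : Int)
    (h : k ∉ d.map Prod.fst) : pvDictSet d k v = d ++ [(k, v)] := by
  induction d with
  | nil => rfl
  | cons p rest ih =>
      simp only [List.map_cons, List.mem_cons, not_or] at h
      simp only [pvDictSet]
      rw [if_neg (fun hb => h.1 (beq_iff_eq.mp hb).symm), List.cons_append, ih h.2]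

lemma mapReplace_eq_pvDictSet (d : List (String × Int)) (k : String) (v : Int)
    (h : (d.map Prod.fst).Nodup) (hm : k ∈ d.map Prod.fst) :
    d.map (fun p => if p.1 == k then (k, v) else p) = pvDictSet d k v := by
  induction d with
  | nil => simp at hm
  | cons p rest ih =>
      simp only [List.map_cons, List.nodup_cons] at h
      by_cases hp : p.1 = k
      · simp only [List.map_cons, pvDictSet]
        rw [if_pos (beq_iff_eq.mpr hp), if_pos (beq_iff_eq.mpr hp)]
        congr 1
        refine (List.map_congr_left fun q hq => ?_).trans (List.map_id _)
        have : ¬ q.1 = k := fun he =>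
          h.1 (hp ▸ he ▸ List.mem_map.mpr ⟨q, hq, rfl⟩)
        rw [if_neg (fun hb => this (beq_iff_eq.mp hb))]
        rfl
      · have hm' : k ∈ rest.map Prod.fst := by
          rcases List.mem_cons.mp hm with he | he
          · exact absurd he.symm hp
          · exact he
        simp only [List.map_cons, pvDictSet]
        rw [if_neg (fun hb => hp (beq_iff_eq.mp hb)), if_neg (fun hb => hp (beq_iff_eq.mp hb)),
          ih h.2 hm']

lemma keys_pvDictSet (d : List (String × Int)) (k : String) (v : Int) :
    (pvDictSet d k v).map Prod.fst =
    if k ∈ d.map Prod.fst then d.map Prod.fst else d.map Prod.fst ++ [k] := by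
  induction d with
  | nil => simp [pvDictSet]
  | cons p rest ih =>
      simp only [pvDictSet]
      by_cases hp : p.1 = k
      · rw [if_pos (beq_iff_eq.mpr hp)]
        simp [hp]
      · rw [if_neg (fun hb => hp (beq_iff_eq.mp hb))]
        simp only [List.map_cons, ih]
        have hkp : ¬ k = p.1 := fun he => hp he.symm
        by_cases hm : k ∈ rest.map Prod.fst <;> simp [hm, hkp]

lemma nodup_keys_pvDictSet (d : List (String × Int)) (k : String) (v : Int)
    (h : (d.map Prod.fst).Nodup) : ((pvDictSet d k v).map Prod.fst).Nodup := by
  rw [keys_pvDictSet]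
  by_cases hm : k ∈ d.map Prod.fst
  · simpa [hm] using h
  · rw [if_neg hm]
    exact h.append (List.nodup_singleton k)
      (fun x hx hx2 => by simp at hx2; exact hm (hx2 ▸ hx))

lemma insert_mk (d : List (String × Int)) (k : String) (v : Int)
    (h : (d.map Prod.fst).Nodup) :
    PySem.Dict.insert (PySem.Dict.mk d) k v = PySem.Dict.mk (pvDictSet d k v) := by
  have hc : (PySem.Dict.mk d).contains k = decide (k ∈ d.map Prod.fst) := by
    rw [PySem.Dict.contains_eq_decide_mem_keys]
    simp [PySem.Dict.keys]
  apply PySem.Dict.ext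
  rw [PySem.Dict.items_insert, hc]
  by_cases hm : k ∈ d.map Prod.fst
  · rw [if_pos (decide_eq_true hm)]
    exact mapReplace_eq_pvDictSet d k v h hm
  · rw [if_neg (by simpa using hm)]
    exact (pvDictSet_not_mem d k v hm).symm

lemma foldl_insert_items (es : List (String × String × Int)) (d : List (String × Int))
    (h : (d.map Prod.fst).Nodup) :
    (es.foldl (fun acc t => PySem.Dict.insert acc t.2.1 t.2.2) (PySem.Dict.mk d)).items =
    es.foldl (fun acc t => pvDictSet acc t.2.1 t.2.2) d := by
  induction es generalizing d with
  | nil => rfl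
  | cons t rest ih =>
      rw [List.foldl_cons, List.foldl_cons, insert_mk d t.2.1 t.2.2 h,
        ih _ (nodup_keys_pvDictSet d t.2.1 t.2.2 h)]

-- the pvGroupedSet fold over any tagged list equals B's staged construction
lemma fold_stage (ts : List (String × String × Int)) :
    ts.foldl (fun g t => pvGroupedSet g t.1 t.2.1 t.2.2) [] =
    (PySem.List.dedup (ts.map (fun t => t.1))).map
      (fun c => (c, (ts.filter (fun t => t.1 == c)).foldl (fun d t => pvDictSet d t.2.1 t.2.2) [])) := by
  induction ts using List.reverseRecOn with
  | nil => rfl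
  | append_singleton ts t ih =>
      rw [List.foldl_append, List.foldl_cons, List.foldl_nil, ih]
      have hded : PySem.List.dedup ((ts ++ [t]).map (fun t => t.1)) =
          PySem.Set.add (PySem.List.dedup (ts.map (fun t => t.1))) t.1 := by
        simp only [PySem.List.dedup, PySem.Set.ofList, List.map_append, List.map_cons,
          List.map_nil, List.foldl_append, List.foldl_cons, List.foldl_nil]
      have hfil : ∀ c : String, (ts ++ [t]).filter (fun t => t.1 == c) =
          ts.filter (fun t => t.1 == c) ++ if t.1 == c then [t] else [] := by
        intro c; simp only [List.filter_append, List.filter_cons, List.filter_nil]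
      set o := PySem.List.dedup (ts.map (fun t => t.1)) with ho
      have hnodup : o.Nodup := PySem.Set.nodup_ofList _
      set f : String → List (String × Int) :=
        fun c => (ts.filter (fun t => t.1 == c)).foldl (fun d t => pvDictSet d t.2.1 t.2.2) [] with hf
      have hstep : ∀ c : String,
          ((ts ++ [t]).filter (fun t => t.1 == c)).foldl (fun d t => pvDictSet d t.2.1 t.2.2) [] =
          if t.1 = c then pvDictSet (f c) t.2.1 t.2.2 else f c := by
        intro c; rw [hfil c]
        by_cases h : t.1 = c
        · simp [h, List.foldl_append, hf]
        · simp [h, hf, beq_iff_eq]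
      rw [hded]
      by_cases hmem : t.1 ∈ o
      · have hadd : PySem.Set.add o t.1 = o := by
          simp [PySem.Set.add, PySem.Set.contains_eq_listContains, List.contains_eq_mem, hmem]
        rw [hadd, groupedSet_map o f t.1 t.2.1 t.2.2 hnodup hmem]
        exact (List.map_congr_left (fun c hcmem => by
          rw [hstep c]; by_cases h : c = t.1 <;> simp [h, eq_comm])).symm
      · have hadd : PySem.Set.add o t.1 = o ++ [t.1] := by
          simp [PySem.Set.add, PySem.Set.contains_eq_listContains, List.contains_eq_mem, hmem]
        rw [hadd, groupedSet_not_mem _ _ _ _ (by simpa using hmem), List.map_append]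
        congr 1
        · refine (List.map_congr_left fun c hcmem => ?_).symm
          have hne : ¬ t.1 = c := fun he => hmem (he ▸ hcmem)
          rw [hstep c, if_neg hne]
        · have hnot : t.1 ∉ ts.map (fun t => t.1) := fun h =>
            hmem (show t.1 ∈ PySem.List.dedup (ts.map (fun t => t.1)) from
              (PySem.Set.mem_ofList _ _).mpr h)
          have hnil : ts.filter (fun t' => t'.1 == t.1) = [] := by
            rw [List.filter_eq_nil_iff]
            intro a hain hbeq
            exact hnot (List.mem_map.mpr ⟨a, hain, (beq_iff_eq.mp hbeq)⟩)
          simp [hnil, pvDictSet]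

-- ===== VERDICT (by name: the statement is the Claim_ definition above) =====
theorem group_languages_spec : Claim_equal_group_languages := by
  intro xs _
  unfold Spec_group_languages group_languages group_languages_alt
  rw [afold_tagged xs [], fold_stage (pvTagged xs)]
  refine List.map_congr_left fun c _ => ?_
  exact congrArg (fun l => (c, l))
    (foldl_insert_items (List.filter (fun t => t.1 == c) (pvTagged xs)) [] (by simp)).symm
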